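-- pv_equiv track=rewrite | github.com/preke/Prompt-Personality | prompt_src/T5_template_generate.py | template_post_process
-- ===== SOURCE A (Python) =====
-- def template_post_process(template_texts):
--     results = []
--     special_tokens = ['<extra_id_0>', '<extra_id_1>', '<extra_id_2>']
--     for template in template_texts:
--
--         new_tmp = []
--         for i in range(len(template)):
--             new_tmp.append(template[i])
--             try:
--                 if template[i] in special_tokens and template[i+1] in special_tokens:
--                     new_tmp.append('')
--             except:
--                 pass
--         results.append(new_tmp)
--     return results
-- ===== SOURCE B (Python) =====
-- def template_post_process(template_texts):
--     specials = {'<extra_id_0>', '<extra_id_1>', '<extra_id_2>'}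
--
--     def runs(template):
--         # split into maximal runs of tokens with equal "specialness"
--         out, i, n = [], 0, len(template)
--         while i < n:
--             key = template[i] in specials
--             j = i + 1
--             while j < n and (template[j] in specials) == key:
--                 j += 1
--             out.append((key, template[i:j]))
--             i = j
--         return out
--
--     results = []
--     for template in template_texts:
--         new_tmp = []
--         for is_special, run in runs(template):
--             if is_special:
--                 # interleave '' between the members of a special run
--                 new_tmp.extend([x for tok in run for x in (tok, '')][:-1])
--             else:
--                 new_tmp.extend(run)
--         results.append(new_tmp)
--     return results
-- ===== Notes on version B (the rewrite author's own statement) =====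
-- stated objective: alternative
-- what changed: Replaces the pairwise index-lookahead with try/except by a two-stage group-by: first split each template into maximal runs of equal specialness, then emit special runs with '' interleaved between their members and non-special runs verbatim.
import Mathlib
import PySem

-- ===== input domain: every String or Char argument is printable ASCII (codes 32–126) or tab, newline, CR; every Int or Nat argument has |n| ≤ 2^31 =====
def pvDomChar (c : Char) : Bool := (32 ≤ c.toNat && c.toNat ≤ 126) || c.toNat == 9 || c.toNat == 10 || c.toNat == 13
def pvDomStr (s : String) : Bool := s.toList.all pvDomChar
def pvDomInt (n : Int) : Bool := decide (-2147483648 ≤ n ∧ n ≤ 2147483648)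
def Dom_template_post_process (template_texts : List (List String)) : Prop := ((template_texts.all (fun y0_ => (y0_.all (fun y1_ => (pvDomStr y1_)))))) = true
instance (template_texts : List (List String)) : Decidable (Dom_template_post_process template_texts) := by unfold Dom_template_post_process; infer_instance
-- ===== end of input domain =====

-- B replaces A's pairwise index-lookahead with try/except by a two-stage group-by:
-- split into maximal runs of equal specialness, then interleave '' inside special runs (alternative decomposition).

def pvSpecialTokens : List String := ["<extra_id_0>", "<extra_id_1>", "<extra_id_2>"]

-- ===== PORT A =====
-- inner 'for i in range(len(template))' loop, as the obvious index recursion over the same accumulator;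
-- 'template[i+1]' is PySem.List.pyGet?: none = IndexError, swallowed by 'except: pass'
def pvLoopA (t : List String) (i : Nat) (acc : List String) : List String :=
  if h : i < t.length then
    let acc1 := acc ++ [t[i]]
    let acc2 :=
      match PySem.List.pyGet? t ((i : Int) + 1) with
      | some nxt => if t[i] ∈ pvSpecialTokens ∧ nxt ∈ pvSpecialTokens then acc1 ++ [""] else acc1
      | none => acc1
    pvLoopA t (i + 1) acc2
  else acc
termination_by t.length - i

def template_post_process (template_texts : List (List String)) : List (List String) :=
  template_texts.foldl (fun results template => results ++ [pvLoopA template 0 []]) []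

-- ===== PORT B =====
-- 'tok in specials' of Source B
def pvSpec (s : String) : Bool := decide (s ∈ pvSpecialTokens)

-- inner 'while j < n and (template[j] in specials) == key: j += 1' of Source B's runs()
def pvRunTo (t : List String) (key : Bool) (j : Nat) : Nat :=
  if h : j < t.length then
    if pvSpec t[j] == key then pvRunTo t key (j + 1) else j
  else j
termination_by t.length - j

theorem pvRunTo_ge (t : List String) (key : Bool) (j : Nat) : j ≤ pvRunTo t key j := by
  unfold pvRunTo
  split_ifs with h1 h2
  · exact le_trans (by omega) (pvRunTo_ge t key (j + 1))
  · exact le_refl j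
  · exact le_refl j
termination_by t.length - j

-- outer 'while i < n' loop of Source B's runs(); template[i:j] with 0 ≤ i ≤ j is exactly (drop i).take (j-i)
def pvRuns (t : List String) (i : Nat) : List (Bool × List String) :=
  if h : i < t.length then
    let key := pvSpec t[i]
    let j := pvRunTo t key (i + 1)
    (key, (t.drop i).take (j - i)) :: pvRuns t j
  else []
termination_by t.length - i
decreasing_by
  have := pvRunTo_ge t (pvSpec t[i]) (i + 1)
  omega

-- "[x for tok in run for x in (tok, '')][:-1]" ; '[:-1]' is dropLast here (exact for any list)
def pvInter (run : List String) : List String := (run.flatMap (fun tok => [tok, ""])).dropLast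

def template_post_process_alt (template_texts : List (List String)) : List (List String) :=
  template_texts.foldl (fun results template =>
    results ++ [(pvRuns template 0).foldl
      (fun new_tmp kr => new_tmp ++ (if kr.1 then pvInter kr.2 else kr.2)) []]) []

-- ===== PRECONDITION & SPEC =====
def Spec_template_post_process (template_texts : List (List String)) (out : List (List String)) : Prop := out = template_post_process_alt template_texts
instance (template_texts : List (List String)) (out : List (List String)) : Decidable (Spec_template_post_process template_texts out) := by unfold Spec_template_post_process; infer_instance

-- ===== CLAIM =====
def Claim_equal_template_post_process : Prop := ∀ (template_texts : List (List String)), Dom_template_post_process template_texts → Spec_template_post_process template_texts (template_post_process template_texts)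

-- ===== LEMMAS AND PROOFS =====

-- common characterisation: '' exactly between two consecutive special tokens
def pvGlue : List String → List String
  | [] => []
  | [x] => [x]
  | x :: y :: r => x :: (if pvSpec x && pvSpec y then [""] else []) ++ pvGlue (y :: r)

-- ---- A = glue ----
theorem pvLoopA_eq_glue (t : List String) :
    ∀ (k i : Nat) (acc : List String), t.length - i = k →
      pvLoopA t i acc = acc ++ pvGlue (t.drop i) := by
  intro k
  induction k with
  | zero =>
    intro i acc hk
    rw [pvLoopA]
    have h : ¬ i < t.length := by omega
    have hd : t.drop i = [] := List.drop_eq_nil_of_le (by omega)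
    simp [h, hd, pvGlue]
  | succ k ih =>
    intro i acc hk
    have h : i < t.length := by omega
    rw [pvLoopA]
    simp only [dif_pos h]
    rw [ih (i + 1) _ (by omega)]
    have hdrop : t.drop i = t[i] :: t.drop (i + 1) := List.drop_eq_getElem_cons h
    have hget : PySem.List.pyGet? t ((i : Int) + 1) = t[i + 1]? := by
      have := PySem.List.pyGet?_natCast (xs := t) (n := i + 1)
      simpa [Nat.cast_add] using this
    simp only [hget]
    by_cases h2 : i + 1 < t.length
    · have hdrop2 : t.drop (i + 1) = t[i + 1] :: t.drop (i + 2) := List.drop_eq_getElem_cons h2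
      rw [hdrop, hdrop2]
      simp only [List.getElem?_eq_getElem h2, pvGlue]
      by_cases ha : t[i] ∈ pvSpecialTokens <;> by_cases hb : t[i+1] ∈ pvSpecialTokens <;>
        simp [ha, hb, pvSpec]
    · have hdrop2 : t.drop (i + 1) = [] := List.drop_eq_nil_of_le (by omega)
      have hnone : t[i + 1]? = none := List.getElem?_eq_none_iff.mpr (by omega)
      rw [hdrop, hdrop2]
      simp [hnone, pvGlue]

-- ---- B = glue ----
theorem pvInter_cons2 (a b : String) (l : List String) :
    pvInter (a :: b :: l) = a :: "" :: pvInter (b :: l) := by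
  unfold pvInter
  simp only [List.flatMap_cons, List.cons_append, List.nil_append]
  rw [List.dropLast_cons_of_ne_nil (by simp), List.dropLast_cons_of_ne_nil (by simp)]

theorem pvGlue_run (key : Bool) (run rest : List String) (hne : run ≠ [])
    (hall : ∀ a ∈ run, pvSpec a = key)
    (hbd : ∀ b ∈ rest.head?, pvSpec b ≠ key) :
    pvGlue (run ++ rest) = (if key then pvInter run else run) ++ pvGlue rest := by
  induction run with
  | nil => exact absurd rfl hne
  | cons a run' ih =>
    cases run' with
    | nil =>
      cases rest with
      | nil => cases key <;> simp [pvGlue, pvInter]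
      | cons b r =>
        have ha : pvSpec a = key := hall a (by simp)
        have hb : pvSpec b ≠ key := hbd b (by simp)
        have hcond : (pvSpec a && pvSpec b) = false := by
          cases key <;> simp_all
        cases key <;> simp [pvGlue, hcond, pvInter]
    | cons b run'' =>
      have ha : pvSpec a = key := hall a (by simp)
      have hb : pvSpec b = key := hall b (by simp)
      have hglue : pvGlue (a :: b :: (run'' ++ rest)) =
          a :: (if pvSpec a && pvSpec b then [""] else []) ++ pvGlue (b :: (run'' ++ rest)) := rfl
      have ih' := ih (by simp) (fun x hx => hall x (List.mem_cons_of_mem a hx))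
      simp only [List.cons_append] at hglue ⊢
      rw [hglue]
      rw [show (b :: (run'' ++ rest)) = (b :: run'') ++ rest by simp, ih']
      cases key with
      | false => simp_all
      | true => simp_all [pvInter_cons2]

-- list-level group-by, linking the index loops to takeWhile/dropWhile
def pvRunsL : List String → List (Bool × List String)
  | [] => []
  | x :: xs =>
    let key := pvSpec x
    (key, x :: xs.takeWhile (fun s => pvSpec s == key)) ::
      pvRunsL (xs.dropWhile (fun s => pvSpec s == key))
termination_by l => l.length
decreasing_by
  have := List.length_dropWhile_le (p := fun s => pvSpec s == pvSpec x) (l := xs)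
  simp; omega

theorem pvRunTo_eq (t : List String) (key : Bool) (j : Nat) :
    pvRunTo t key j = j + ((t.drop j).takeWhile (fun s => pvSpec s == key)).length := by
  unfold pvRunTo
  split_ifs with h1 h2
  · rw [pvRunTo_eq t key (j + 1), List.drop_eq_getElem_cons h1]
    simp only [List.takeWhile_cons, h2, if_true, List.length_cons]
    omega
  · rw [List.drop_eq_getElem_cons h1]
    simp only [List.takeWhile_cons, h2]
    simp
  · have : t.drop j = [] := List.drop_eq_nil_of_le (by omega)
    simp [this]
termination_by t.length - j

theorem pv_drop_length_takeWhile (p : String → Bool) (l : List String) :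
    l.drop (l.takeWhile p).length = l.dropWhile p := by
  induction l with
  | nil => rfl
  | cons a l ih => by_cases h : p a <;> simp [h, ih]

theorem pvRuns_eq (t : List String) : ∀ (k i : Nat), t.length - i ≤ k →
    pvRuns t i = pvRunsL (t.drop i) := by
  intro k
  induction k with
  | zero =>
    intro i hk
    rw [pvRuns]
    have h : ¬ i < t.length := by omega
    have hd : t.drop i = [] := List.drop_eq_nil_of_le (by omega)
    simp [h, hd, pvRunsL]
  | succ k ih =>
    intro i hk
    by_cases h : i < t.length
    · rw [pvRuns]
      simp only [dif_pos h]
      have hdrop : t.drop i = t[i] :: t.drop (i + 1) := List.drop_eq_getElem_cons h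
      have hj : pvRunTo t (pvSpec t[i]) (i + 1) =
          i + 1 + ((t.drop (i + 1)).takeWhile (fun s => pvSpec s == pvSpec t[i])).length :=
        pvRunTo_eq t _ (i + 1)
      have hlen : ((t.drop (i + 1)).takeWhile (fun s => pvSpec s == pvSpec t[i])).length
          ≤ t.length - (i + 1) := by
        have h1 := (List.takeWhile_prefix (l := t.drop (i + 1))
          (p := fun s => pvSpec s == pvSpec t[i])).length_le
        simpa using h1
      have htake : (t.drop i).take (pvRunTo t (pvSpec t[i]) (i + 1) - i) =
          t[i] :: (t.drop (i + 1)).takeWhile (fun s => pvSpec s == pvSpec t[i]) := by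
        rw [hdrop, hj]
        have hh : i + 1 + ((t.drop (i + 1)).takeWhile (fun s => pvSpec s == pvSpec t[i])).length - i
            = ((t.drop (i + 1)).takeWhile (fun s => pvSpec s == pvSpec t[i])).length + 1 := by omega
        rw [hh]
        simp only [List.take_succ_cons]
        congr 1
        exact (List.prefix_iff_eq_take.mp (List.takeWhile_prefix _)).symm
      have hrest : t.drop (pvRunTo t (pvSpec t[i]) (i + 1)) =
          (t.drop (i + 1)).dropWhile (fun s => pvSpec s == pvSpec t[i]) := by
        rw [hj, ← List.drop_drop, pv_drop_length_takeWhile]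
      rw [htake, ih (pvRunTo t (pvSpec t[i]) (i + 1)) (by omega), hrest]
      conv_rhs => rw [hdrop, pvRunsL]
    · rw [pvRuns]
      have hd : t.drop i = [] := List.drop_eq_nil_of_le (by omega)
      simp [h, hd, pvRunsL]

theorem pvRunsL_glue : ∀ (t : List String),
    (pvRunsL t).flatMap (fun kr => if kr.1 then pvInter kr.2 else kr.2) = pvGlue t := by
  intro t
  induction t using pvRunsL.induct with
  | case1 => simp [pvRunsL, pvGlue]
  | case2 x xs key ih =>
    rw [pvRunsL]
    simp only [List.flatMap_cons]
    rw [ih]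
    have hsplit : x :: xs =
        (x :: xs.takeWhile (fun s => pvSpec s == pvSpec x)) ++
          xs.dropWhile (fun s => pvSpec s == pvSpec x) := by
      simp [List.takeWhile_append_dropWhile]
    conv_rhs => rw [hsplit]
    rw [pvGlue_run (pvSpec x)]
    · simp
    · intro a ha
      rcases List.mem_cons.mp ha with h | h
      · rw [h]
      · have := List.mem_takeWhile_imp h
        simpa using this
    · intro b hb
      cases hdw : xs.dropWhile (fun s => pvSpec s == pvSpec x) with
      | nil => simp [hdw] at hb
      | cons c cs =>
        simp [hdw] at hb
        subst hb
        have := List.head?_dropWhile_not (fun s => pvSpec s == pvSpec x) xs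
        rw [hdw] at this
        simpa using this

-- ===== VERDICT =====
theorem template_post_process_spec : Claim_equal_template_post_process := by
  intro template_texts _
  unfold Spec_template_post_process template_post_process template_post_process_alt
  congr 1
  funext results template
  congr 1
  rw [pvLoopA_eq_glue template (template.length - 0) 0 [] rfl, List.drop_zero]
  rw [pvRuns_eq template (template.length - 0) 0 (le_refl _), List.drop_zero]
  rw [PySem.List.foldl_append_eq_flatMap]
  simp [pvRunsL_glue]
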